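-- pv_equiv track=rewrite | github.com/mdsulemanr/pythonPractice | recursion_examples.py | zero_count
-- ===== SOURCE A (Python) =====
-- def zero_count(n):
--     if n==[]:
--         return 0
--     result=0
--
--     if int(n[0])==0:
--         result+=1
--         result+=zero_count(n[1:])
--     result+=zero_count(n[1:])
--
--     return result
-- ===== SOURCE B (Python) =====
-- def zero_count(n):
--     result = 0
--     for x in reversed(n):
--         if int(x) == 0:
--             result = 1 + 2 * result
--     return result
-- ===== Notes on version B (the rewrite author's own statement) =====
-- stated objective: faster
-- what changed: Replaced the branching double recursion (two recursive calls per zero, exponential in the number of zeros) with a single right-to-left iterative pass applying result = 1 + 2*result at each zero.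
import Mathlib
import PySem

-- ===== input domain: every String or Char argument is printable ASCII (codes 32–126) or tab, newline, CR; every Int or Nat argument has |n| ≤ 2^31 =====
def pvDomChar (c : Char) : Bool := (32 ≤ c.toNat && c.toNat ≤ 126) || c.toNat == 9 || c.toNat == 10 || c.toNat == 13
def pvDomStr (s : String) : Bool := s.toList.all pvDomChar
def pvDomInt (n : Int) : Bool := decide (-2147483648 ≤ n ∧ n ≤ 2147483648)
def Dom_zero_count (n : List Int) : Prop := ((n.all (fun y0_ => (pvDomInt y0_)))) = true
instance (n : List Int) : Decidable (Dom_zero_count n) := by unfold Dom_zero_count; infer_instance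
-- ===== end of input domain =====

-- B replaces A's exponential double recursion with one right-to-left pass (result = 1 + 2*result per zero): asymptotically faster.


-- ===== PORT A =====
-- literal transliteration of A: result = 0; if n[0]==0 then result += 1; result += rec; then result += rec
def zero_count (n : List Int) : Int :=
  match n with
  | [] => 0
  | x :: xs =>
    if x = 0 then 0 + 1 + zero_count xs + zero_count xs
    else 0 + zero_count xs

-- ===== PORT B =====
-- literal transliteration of B: acc = 0; for x in reversed(n): if x == 0: acc = 1 + 2*acc
def zero_count_alt (n : List Int) : Int :=
  n.reverse.foldl (fun result x => if x = 0 then 1 + 2 * result else result) 0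

-- ===== PRECONDITION & SPEC =====
def Spec_zero_count (n : List Int) (out : Int) : Prop := out = zero_count_alt n
instance (n : List Int) (out : Int) : Decidable (Spec_zero_count n out) := by unfold Spec_zero_count; infer_instance

-- ===== CLAIM (what is proved, stated in full; the proofs are below) =====
def Claim_equal_zero_count : Prop := ∀ (n : List Int), Dom_zero_count n → Spec_zero_count n (zero_count n)

-- ===== LEMMAS AND PROOFS =====
theorem zero_count_alt_cons (x : Int) (xs : List Int) :
    zero_count_alt (x :: xs) =
      if x = 0 then 1 + 2 * zero_count_alt xs else zero_count_alt xs := by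
  simp [zero_count_alt, List.foldl_append]

theorem zero_count_eq_alt (n : List Int) : zero_count n = zero_count_alt n := by
  induction n with
  | nil => rfl
  | cons x xs ih =>
    rw [zero_count_alt_cons]
    simp only [zero_count, ih]
    split_ifs <;> ring

-- ===== VERDICT (by name: the statement is the Claim_ definition above) =====
theorem zero_count_spec : Claim_equal_zero_count := by
  intro n _
  exact zero_count_eq_alt n
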